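-- pv_equiv track=rewrite | github.com/StevenSU4/AudioDaily | main.py | parse_label_response
-- ===== SOURCE A (Python) =====
-- def clean_label_response(llm_response):
--     """
--     Clean and format the LLM response to ensure it's concise.
--
--     Args:
--         llm_response (str): Raw response from LLM
--
--     Returns:
--         str: Cleaned, concise label
--     """
--     # Remove any quotation marks
--     cleaned = llm_response.strip('"\'').strip()
--
--     # If response is too long, take only the first sentence
--     if len(cleaned) > 100:
--         # Split by common sentence endings and take first part
--         for delimiter in ['.', ';', '-']:
--             if delimiter in cleaned:
--                 cleaned = cleaned.split(delimiter)[0].strip()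
--                 break
--         # If still too long, truncate
--         if len(cleaned) > 100:
--             cleaned = cleaned[:97] + "..."
--
--     return cleaned
--
-- def parse_label_response(llm_response, current_label1):
--     """
--     Parse the LLM response to extract label2 and updated label1.
--
--     Args:
--         llm_response (str): Raw response from LLM
--         current_label1 (str): Current label1 value
--
--     Returns:
--         tuple: (label2, label1) where label1 is updated if needed, otherwise current_label1
--     """
--     lines = llm_response.strip().split('\n')
--     label2 = ""
--     label1 = current_label1
--
--     i = 0
--     while i < len(lines):
--         line = lines[i].strip()
--
--         if line.startswith('LABEL2:') or line.startswith('Label2:') or line.startswith('label2:'):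
--             # Extract label2 (might span multiple lines)
--             label2_parts = [line.split(':', 1)[1].strip()]
--             i += 1
--             # Continue reading subsequent lines until we hit LABEL1 or end
--             while i < len(lines) and not (
--                 lines[i].strip().startswith('LABEL1:') or
--                 lines[i].strip().startswith('Label1:') or
--                 lines[i].strip().startswith('label1:')
--             ):
--                 label2_parts.append(lines[i].strip())
--                 i += 1
--             label2 = ' '.join(label2_parts).strip()
--
--         elif line.startswith('LABEL1:') or line.startswith('Label1:') or line.startswith('label1:'):
--             new_label1 = line.split(':', 1)[1].strip()
--             # Only update if different from current and not empty
--             if new_label1 and new_label1 != current_label1: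
--                 label1 = clean_label_response(new_label1)
--             i += 1
--         else:
--             i += 1
--
--     # If we didn't find structured response, try to parse differently
--     if not label2:
--         # Look for the most detailed part as label2
--         paragraphs = [p.strip() for p in llm_response.split('\n\n') if p.strip()]
--         if len(paragraphs) >= 2:
--             label2 = paragraphs[0]  # Assume first paragraph is detailed description
--             # Last part might be the concise label
--             last_part = paragraphs[-1]
--             if len(last_part) < 100:  # Likely the concise label
--                 label1 = clean_label_response(last_part)
--         elif paragraphs:
--             label2 = llm_response
--
--     return label2, label1
-- ===== SOURCE B (Python) =====
-- def clean_label_response(llm_response):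
--     cleaned = llm_response.strip('"\'').strip()
--     if len(cleaned) > 100:
--         for delimiter in ['.', ';', '-']:
--             if delimiter in cleaned:
--                 cleaned = cleaned.split(delimiter)[0].strip()
--                 break
--         if len(cleaned) > 100:
--             cleaned = cleaned[:97] + "..."
--     return cleaned
--
-- def _is_l2(line):
--     return line.startswith('LABEL2:') or line.startswith('Label2:') or line.startswith('label2:')
--
-- def _is_l1(line):
--     return line.startswith('LABEL1:') or line.startswith('Label1:') or line.startswith('label1:')
--
-- def _apply_l1(line, current_label1, label1):
--     new_label1 = line.split(':', 1)[1].strip()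
--     if new_label1 and new_label1 != current_label1:
--         return clean_label_response(new_label1)
--     return label1
--
-- def parse_label_response(llm_response, current_label1):
--     label2 = ""
--     label1 = current_label1
--     collecting = None  # None, or the list of label2 parts being gathered
--
--     for raw in llm_response.strip().split('\n'):
--         line = raw.strip()
--         if collecting is not None:
--             if _is_l1(line):
--                 label2 = ' '.join(collecting).strip()
--                 collecting = None
--                 label1 = _apply_l1(line, current_label1, label1)
--             else:
--                 collecting.append(line)
--         elif _is_l2(line):
--             collecting = [line.split(':', 1)[1].strip()]
--         elif _is_l1(line):
--             label1 = _apply_l1(line, current_label1, label1)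
--
--     if collecting is not None:
--         label2 = ' '.join(collecting).strip()
--
--     if not label2:
--         paragraphs = [p.strip() for p in llm_response.split('\n\n') if p.strip()]
--         if len(paragraphs) >= 2:
--             label2 = paragraphs[0]
--             last_part = paragraphs[-1]
--             if len(last_part) < 100:
--                 label1 = clean_label_response(last_part)
--         elif paragraphs:
--             label2 = llm_response
--     return label2, label1
-- ===== Notes on version B (the rewrite author's own statement) =====
-- stated objective: simpler
-- what changed: Replaced A's outer while with a shared index plus a nested inner while by one flat pass over the lines carrying a 'collecting' accumulator that is finalized at a LABEL1 boundary or at end of input; the fallback paragraph logic is unchanged.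
import Mathlib
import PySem

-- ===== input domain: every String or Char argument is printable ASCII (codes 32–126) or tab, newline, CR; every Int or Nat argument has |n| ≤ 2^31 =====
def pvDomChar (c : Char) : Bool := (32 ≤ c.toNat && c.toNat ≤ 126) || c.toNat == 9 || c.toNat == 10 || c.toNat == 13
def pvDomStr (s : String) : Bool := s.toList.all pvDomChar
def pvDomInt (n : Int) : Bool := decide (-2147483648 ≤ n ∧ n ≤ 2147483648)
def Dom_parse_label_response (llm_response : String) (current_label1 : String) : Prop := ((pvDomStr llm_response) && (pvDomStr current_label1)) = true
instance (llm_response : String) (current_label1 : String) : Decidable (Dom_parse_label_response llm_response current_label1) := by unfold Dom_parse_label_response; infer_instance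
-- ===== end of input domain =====

-- B replaces A's outer while with a shared index and a nested inner while by one flat pass over the
-- lines carrying a 'collecting' accumulator (objective: simpler decomposition, same cost).

-- ===== shared helpers (both Python files contain identical clean_label_response / marker tests / fallback code) =====

-- clean_label_response, transliterated (the for-over-['.',';','-'] with break is the if/elif chain)
def pvClean (s : String) : String :=
  let cleaned := PySem.Str.strip (PySem.Str.stripChars s "\"'")
  if 100 < PySem.Str.len cleaned then
    let cleaned :=
      if PySem.Str.isIn "." cleaned then PySem.Str.strip (((PySem.Str.split? cleaned ".").getD []).getD 0 "")
      else if PySem.Str.isIn ";" cleaned then PySem.Str.strip (((PySem.Str.split? cleaned ";").getD []).getD 0 "")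
      else if PySem.Str.isIn "-" cleaned then PySem.Str.strip (((PySem.Str.split? cleaned "-").getD []).getD 0 "")
      else cleaned
    if 100 < PySem.Str.len cleaned then PySem.Str.slice cleaned none (some 97) ++ "..." else cleaned
  else cleaned

def pvIsL2 (line : String) : Bool :=
  PySem.Str.startswith line "LABEL2:" || PySem.Str.startswith line "Label2:" || PySem.Str.startswith line "label2:"

def pvIsL1 (line : String) : Bool :=
  PySem.Str.startswith line "LABEL1:" || PySem.Str.startswith line "Label1:" || PySem.Str.startswith line "label1:"

-- line.split(':', 1)[1].strip()  (the marker guarantees ':' ∈ line, so index 1 exists; getD is exact there)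
def pvAfter (line : String) : String :=
  PySem.Str.strip (((PySem.Str.splitMax? line ":" 1).getD []).getD 1 "")

-- the label1 update both programs perform on a LABEL1 marker line
def pvUpd (line current_label1 label1 : String) : String :=
  let new_label1 := pvAfter line
  if new_label1 != "" && new_label1 != current_label1 then pvClean new_label1 else label1

-- the final 'if not label2:' paragraph fallback, identical in both programs
def pvFallback (llm_response : String) (label2 label1 : String) : String × String :=
  if label2 == "" then
    let paragraphs := (((PySem.Str.split? llm_response "\n\n").getD []).map PySem.Str.strip).filter (fun p => p != "")
    if 2 ≤ paragraphs.length then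
      let last_part := paragraphs.getD (paragraphs.length - 1) ""
      if PySem.Str.len last_part < 100 then (paragraphs.getD 0 "", pvClean last_part)
      else (paragraphs.getD 0 "", label1)
    else if paragraphs != [] then (llm_response, label1)
    else (label2, label1)
  else (label2, label1)

-- ===== PORT A =====

-- A's inner while: consume stripped lines into parts until a LABEL1 marker (left unconsumed) or end
def pvAInner (rest : List String) (parts : List String) : List String × List String :=
  match rest with
  | [] => (parts, [])
  | l :: ls => if pvIsL1 (PySem.Str.strip l) then (parts, l :: ls)
               else pvAInner ls (parts ++ [PySem.Str.strip l])

theorem pvAInner_len_le (rest parts : List String) : (pvAInner rest parts).2.length ≤ rest.length := by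
  induction rest generalizing parts with
  | nil => simp [pvAInner]
  | cons l ls ih =>
    simp only [pvAInner]
    split
    · simp
    · exact le_trans (ih _) (Nat.le_succ _)

-- A's outer while over the remaining lines
def pvALoop (current_label1 : String) : List String → String → String → String × String
  | [], label2, label1 => (label2, label1)
  | l :: ls, label2, label1 =>
    let line := PySem.Str.strip l
    if pvIsL2 line then
      let p := pvAInner ls [pvAfter line]
      pvALoop current_label1 p.2 (PySem.Str.strip (PySem.Str.join " " p.1)) label1
    else if pvIsL1 line then
      pvALoop current_label1 ls label2 (pvUpd line current_label1 label1)
    else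
      pvALoop current_label1 ls label2 label1
termination_by rest => rest.length
decreasing_by
  · exact Nat.lt_succ_of_le (pvAInner_len_le ls _)
  · simp
  · simp

def parse_label_response (llm_response : String) (current_label1 : String) : String × String :=
  let lines := (PySem.Str.split? (PySem.Str.strip llm_response) "\n").getD []
  let r := pvALoop current_label1 lines "" current_label1
  pvFallback llm_response r.1 r.2

-- ===== PORT B =====

-- B's single flat pass: 'collecting = none' is normal mode, 'some parts' is gathering label2 parts
def pvBLoop (current_label1 : String) : List String → Option (List String) → String → String → String × String
  | [], none, label2, label1 => (label2, label1)
  | [], some parts, _, label1 => (PySem.Str.strip (PySem.Str.join " " parts), label1)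
  | raw :: ls, some parts, label2, label1 =>
    let line := PySem.Str.strip raw
    if pvIsL1 line then
      pvBLoop current_label1 ls none (PySem.Str.strip (PySem.Str.join " " parts))
        (pvUpd line current_label1 label1)
    else
      pvBLoop current_label1 ls (some (parts ++ [line])) label2 label1
  | raw :: ls, none, label2, label1 =>
    let line := PySem.Str.strip raw
    if pvIsL2 line then pvBLoop current_label1 ls (some [pvAfter line]) label2 label1
    else if pvIsL1 line then pvBLoop current_label1 ls none label2 (pvUpd line current_label1 label1)
    else pvBLoop current_label1 ls none label2 label1

def parse_label_response_alt (llm_response : String) (current_label1 : String) : String × String :=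
  let lines := (PySem.Str.split? (PySem.Str.strip llm_response) "\n").getD []
  let r := pvBLoop current_label1 lines none "" current_label1
  pvFallback llm_response r.1 r.2

-- ===== PRECONDITION & SPEC =====
def Spec_parse_label_response (llm_response : String) (current_label1 : String) (out : String × String) : Prop := out = parse_label_response_alt llm_response current_label1
instance (llm_response : String) (current_label1 : String) (out : String × String) : Decidable (Spec_parse_label_response llm_response current_label1 out) := by unfold Spec_parse_label_response; infer_instance

-- ===== CLAIM (what is proved, stated in full; the proofs are below) =====
def Claim_equal_parse_label_response : Prop := ∀ (llm_response : String) (current_label1 : String), Dom_parse_label_response llm_response current_label1 → Spec_parse_label_response llm_response current_label1 (parse_label_response llm_response current_label1)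

-- ===== LEMMAS AND PROOFS =====

-- a line cannot start with both a LABEL1 and a LABEL2 marker (all six prefixes have length 7 and differ)
theorem pvL1_not_L2 (line : String) (h : pvIsL1 line = true) : pvIsL2 line = false := by
  simp only [pvIsL1, pvIsL2, Bool.or_eq_true, PySem.Str.startswith_eq] at *
  simp only [Bool.or_eq_false_iff]
  have key : ∀ p q : List Char, p.length = q.length → p ≠ q →
      p <+: line.toList → PySem.Chars.startswith line.toList q = false := by
    intro p q hlen hne hp
    rw [← Bool.not_eq_true, PySem.Chars.startswith_iff]
    intro hq
    exact hne ((List.prefix_of_prefix_length_le hp hq (by omega)).eq_of_length hlen)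
  rcases h with (h | h) | h <;>
    rw [PySem.Chars.startswith_iff] at h <;>
    exact ⟨⟨key _ _ (by decide) (by decide) h, key _ _ (by decide) (by decide) h⟩,
           key _ _ (by decide) (by decide) h⟩

-- the two loops agree, jointly by strong induction on the number of remaining lines
theorem pvLoops_eq (cur : String) : ∀ n (ls : List String), ls.length = n →
    (∀ l2 l1, pvBLoop cur ls none l2 l1 = pvALoop cur ls l2 l1) ∧
    (∀ parts l2 l1, pvBLoop cur ls (some parts) l2 l1 =
      pvALoop cur (pvAInner ls parts).2
        (PySem.Str.strip (PySem.Str.join " " (pvAInner ls parts).1)) l1) := by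
  intro n
  induction n using Nat.strong_induction_on with
  | _ n ih =>
    intro ls hlen
    constructor
    · intro l2 l1
      match ls, hlen with
      | [], _ => simp [pvBLoop, pvALoop]
      | raw :: ls, hlen =>
        rw [pvBLoop, pvALoop]
        by_cases h2 : pvIsL2 (PySem.Str.strip raw) = true
        · simp only [h2, if_true]
          exact (ih ls.length (by simp at hlen; omega) ls rfl).2 _ l2 l1
        · simp only [Bool.not_eq_true] at h2
          simp only [h2]
          by_cases h1 : pvIsL1 (PySem.Str.strip raw) = true
          · simp only [h1, if_true]
            exact (ih ls.length (by simp at hlen; omega) ls rfl).1 _ _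
          · simp only [Bool.not_eq_true] at h1
            simp only [h1]
            exact (ih ls.length (by simp at hlen; omega) ls rfl).1 _ _
    · intro parts l2 l1
      match ls, hlen with
      | [], _ => simp [pvBLoop, pvAInner, pvALoop]
      | raw :: ls, hlen =>
        rw [pvBLoop]
        by_cases h1 : pvIsL1 (PySem.Str.strip raw) = true
        · simp only [h1, if_true, pvAInner]
          rw [pvALoop]
          simp only [pvL1_not_L2 _ h1, h1, if_true]
          exact (ih ls.length (by simp at hlen; omega) ls rfl).1 _ _
        · simp only [Bool.not_eq_true] at h1
          simp only [h1, Bool.false_eq_true, if_false, pvAInner]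
          exact (ih ls.length (by simp at hlen; omega) ls rfl).2 _ l2 l1

-- ===== VERDICT (by name: the statement is the Claim_ definition above) =====
theorem parse_label_response_spec : Claim_equal_parse_label_response := by
  intro llm cur _
  unfold Spec_parse_label_response parse_label_response parse_label_response_alt
  exact congrArg (fun r : String × String => pvFallback llm r.1 r.2)
    (((pvLoops_eq cur _ _ rfl).1 "" cur).symm)
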